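-- pv_equiv track=rewrite | github.com/ianmenethil/PublicHPP-TPUAT | convert.py | _guess_string_enum
-- ===== SOURCE A (Python) =====
-- from typing import Any, Dict, List, Optional, Tuple
--
-- def _guess_string_enum(value: str) -> Optional[List[str]]:
--     if not value:
--         return None
--     low = value.lower()
--     if "possible values" not in low and "possiible values" not in low:
--         return None
--     lines = [ln.strip() for ln in value.splitlines() if ln.strip()]
--     while lines and ("possible values" in lines[0].lower() or "possiible values" in lines[0].lower()):
--         lines.pop(0)
--     lines = [ln for ln in lines if ln.lower() != "format:"]
--     out: List[str] = []
--     for ln in lines: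
--         if "=>" in ln:
--             out.append(ln.split("=>", 1)[0].strip())
--         else:
--             out.append(ln)
--     dedup: List[str] = []
--     seen = set()
--     for x in out:
--         if not x or x in seen:
--             continue
--         seen.add(x)
--         dedup.append(x)
--     return dedup or None
-- ===== SOURCE B (Python) =====
-- def _guess_string_enum(value):
--     if not value:
--         return None
--     low = value.lower()
--     if "possible values" not in low and "possiible values" not in low:
--         return None
--     in_prefix = True
--     seen = set()
--     out = []
--     for ln in [ln.strip() for ln in value.splitlines() if ln.strip()]:
--         if in_prefix and ("possible values" in ln.lower() or "possiible values" in ln.lower()):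
--             continue
--         in_prefix = False
--         if ln.lower() == "format:":
--             continue
--         key = ln.split("=>", 1)[0].strip() if "=>" in ln else ln
--         if key and key not in seen:
--             seen.add(key)
--             out.append(key)
--     return out or None
-- ===== Notes on version B (the rewrite author's own statement) =====
-- stated objective: simpler
-- what changed: A's four sequential passes over the line list (while-loop popping leading header lines, a 'format:' filter, a '=>'-key mapping pass, then a separate dedup loop) are fused into one loop over the stripped non-empty lines carrying an in_prefix flag, a seen set and the output list.
import Mathlib
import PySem

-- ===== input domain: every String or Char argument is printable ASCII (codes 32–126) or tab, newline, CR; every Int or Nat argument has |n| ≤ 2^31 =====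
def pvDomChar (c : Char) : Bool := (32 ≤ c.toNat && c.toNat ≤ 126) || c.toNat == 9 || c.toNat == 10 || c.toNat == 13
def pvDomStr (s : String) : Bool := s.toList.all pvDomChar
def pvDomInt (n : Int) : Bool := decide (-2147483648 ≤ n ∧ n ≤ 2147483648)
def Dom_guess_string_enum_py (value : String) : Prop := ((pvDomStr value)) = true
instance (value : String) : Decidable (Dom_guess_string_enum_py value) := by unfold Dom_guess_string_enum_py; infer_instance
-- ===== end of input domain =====

-- B replaces A's four sequential passes (leading-header while-pop, "format:" filter,
-- "=>"-key map, dedup loop) by one fused loop carrying an in_prefix flag; objective: simpler.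

-- shared pure helpers (identical subexpressions of both Pythons)
def pvHdr (s : String) : Bool :=
  PySem.Str.isIn "possible values" (PySem.Str.lower s) || PySem.Str.isIn "possiible values" (PySem.Str.lower s)

def pvKey (ln : String) : String :=
  if PySem.Str.isIn "=>" ln then
    PySem.Str.strip (((PySem.Str.splitMax? ln "=>" 1).getD []).headD "")
  else ln

-- ===== PORT A =====
-- the 'while lines and header(lines[0]): lines.pop(0)' loop
def aDrop : List String → List String
  | [] => []
  | l :: t => if pvHdr l then aDrop t else l :: t

-- A's dedup loop over out, carrying (seen, dedup)
def aDedup : List String → PySem.Set String → List String → List String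
  | [], _, dedup => dedup
  | x :: t, seen, dedup =>
    if x = "" || PySem.Set.contains seen x then aDedup t seen dedup
    else aDedup t (PySem.Set.add seen x) (dedup ++ [x])

def guess_string_enum_py (value : String) : Option (List String) :=
  if value = "" then none
  else
    let low := PySem.Str.lower value
    if !(PySem.Str.isIn "possible values" low) && !(PySem.Str.isIn "possiible values" low) then none
    else
      let lines0 := ((PySem.Str.splitlines value).map PySem.Str.strip).filter (fun ln => decide (ln ≠ ""))
      let lines1 := aDrop lines0
      let lines2 := lines1.filter (fun ln => decide (PySem.Str.lower ln ≠ "format:"))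
      let out := lines2.foldl (fun acc ln => acc ++ [pvKey ln]) []
      let dedup := aDedup out [] []
      if dedup = [] then none else some dedup

-- ===== PORT B =====
-- B's single loop, carrying (in_prefix, seen, out)
def bLoop : List String → Bool → PySem.Set String → List String → List String
  | [], _, _, out => out
  | ln :: t, inPre, seen, out =>
    if inPre && pvHdr ln then bLoop t inPre seen out
    else if PySem.Str.lower ln = "format:" then bLoop t false seen out
    else
      let key := pvKey ln
      if key ≠ "" && !(PySem.Set.contains seen key) then bLoop t false (PySem.Set.add seen key) (out ++ [key])
      else bLoop t false seen out

def guess_string_enum_py_alt (value : String) : Option (List String) :=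
  if value = "" then none
  else
    let low := PySem.Str.lower value
    if !(PySem.Str.isIn "possible values" low) && !(PySem.Str.isIn "possiible values" low) then none
    else
      let lines := ((PySem.Str.splitlines value).map PySem.Str.strip).filter (fun ln => decide (ln ≠ ""))
      let out := bLoop lines true [] []
      if out = [] then none else some out

-- ===== PRECONDITION & SPEC =====
def Spec_guess_string_enum_py (value : String) (out : Option (List String)) : Prop := out = guess_string_enum_py_alt value
instance (value : String) (out : Option (List String)) : Decidable (Spec_guess_string_enum_py value out) := by unfold Spec_guess_string_enum_py; infer_instance

-- ===== CLAIM (what is proved, stated in full; the proofs are below) =====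
def Claim_equal_guess_string_enum_py : Prop := ∀ (value : String), Dom_guess_string_enum_py value → Spec_guess_string_enum_py value (guess_string_enum_py value)

-- ===== LEMMAS AND PROOFS =====

-- in false mode, B's loop is exactly A's filter+map+dedup pipeline
theorem bLoop_false (ls : List String) : ∀ (seen : PySem.Set String) (out : List String),
    bLoop ls false seen out
      = aDedup ((ls.filter (fun ln => decide (PySem.Str.lower ln ≠ "format:"))).map pvKey) seen out := by
  induction ls with
  | nil => intro seen out; rfl
  | cons l t ih =>
    intro seen out
    by_cases hf : PySem.Str.lower l = "format:"
    · simp [bLoop, hf, ih]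
    · by_cases hk1 : pvKey l = ""
      · simp [bLoop, hf, hk1, aDedup, ih]
      · simp [bLoop, hf, hk1, aDedup, ih]

-- the in_prefix phase: B skips exactly the leading headers A pops
theorem bLoop_true (ls : List String) : ∀ (seen : PySem.Set String) (out : List String),
    bLoop ls true seen out = bLoop (aDrop ls) false seen out := by
  induction ls with
  | nil => intro seen out; rfl
  | cons l t ih =>
    intro seen out
    by_cases h : pvHdr l = true
    · simp [bLoop, aDrop, h, ih]
    · simp [bLoop, aDrop, h]

-- ===== VERDICT (by name: the statement is the Claim_ definition above) =====
theorem guess_string_enum_py_spec : Claim_equal_guess_string_enum_py := by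
  intro value _
  unfold Spec_guess_string_enum_py guess_string_enum_py guess_string_enum_py_alt
  have hfold : ∀ (l : List String), l.foldl (fun acc ln => acc ++ [pvKey ln]) [] = l.map pvKey := by
    intro l
    induction l using List.reverseRecOn with
    | nil => rfl
    | append_singleton t x ih => simp [ih]
  simp only [bLoop_true, bLoop_false, hfold]
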